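-- pv_equiv track=rewrite | github.com/faceless7171/ansible-docs-gen | src/ansibledocs/variables_parser.py | __associate_comments
-- ===== SOURCE A (Python) =====
-- def __associate_comments(yaml_str):
--     comments_dict = {}
--     comment = ""
--     for line in yaml_str.splitlines():
--         if line.startswith('#'):
--             comment += line[1:].replace(' ', '&nbsp;') + '<br/>'
--         elif line and not line[0].isspace():
--             comments_dict[line.split(':')[0]] = comment
--             comment = ""
--         else:
--             comment = ""
--
--     return comments_dict
-- ===== SOURCE B (Python) =====
-- def __associate_comments(yaml_str):
--     comments_dict = {}
--     before = []
--     for line in yaml_str.splitlines():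
--         if line and not line[0].isspace() and not line.startswith('#'):
--             pieces = []
--             for prev in reversed(before):
--                 if not prev.startswith('#'):
--                     break
--                 pieces.append(prev[1:].replace(' ', '&nbsp;') + '<br/>')
--             comments_dict[line.split(':')[0]] = ''.join(reversed(pieces))
--         before.append(line)
--     return comments_dict
-- ===== Notes on version B (the rewrite author's own statement) =====
-- stated objective: alternative
-- what changed: B replaces A's running comment accumulator (global state reset on every non-comment line) by a per-key local backward scan: for each top-level key line it walks back over the immediately preceding comment lines and joins their transformed pieces.
import Mathlib
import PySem

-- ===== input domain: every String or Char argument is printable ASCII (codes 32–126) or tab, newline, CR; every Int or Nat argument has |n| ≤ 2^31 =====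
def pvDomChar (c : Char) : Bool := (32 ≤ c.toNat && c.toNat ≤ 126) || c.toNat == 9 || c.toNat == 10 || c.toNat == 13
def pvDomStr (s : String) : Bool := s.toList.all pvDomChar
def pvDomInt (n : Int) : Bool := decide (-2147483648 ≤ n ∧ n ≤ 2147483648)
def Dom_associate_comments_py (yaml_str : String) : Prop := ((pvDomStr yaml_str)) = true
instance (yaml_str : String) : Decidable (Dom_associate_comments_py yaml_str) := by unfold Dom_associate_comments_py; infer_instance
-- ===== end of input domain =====

-- B changes the decomposition (per-key backward scan instead of A's running accumulator); same behaviour, same cost.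

-- ===== PORT A =====
-- line[1:].replace(' ', '&nbsp;') + '<br/>'  (shared by both Pythons verbatim)
def pvTrans (line : List Char) : List Char :=
  PySem.Chars.replace (PySem.List.slice line (some 1) none) [' '] "&nbsp;".toList ++ "<br/>".toList

-- line.split(':')[0]  (shared by both Pythons verbatim; split always yields a nonempty list)
def pvKey (line : List Char) : List Char :=
  (PySem.Chars.splitOn line [':']).headD []

-- the body of A's for-loop, on state (comments_dict, comment)
def pvStepA (st : PySem.Dict (List Char) (List Char) × List Char) (line : List Char) :
    PySem.Dict (List Char) (List Char) × List Char :=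
  if PySem.Chars.startswith line ['#'] then
    (st.1, st.2 ++ pvTrans line)
  else if !line.isEmpty && !(PySem.Chars.isspace (line.headD ' ')) then
    (st.1.insert (pvKey line) st.2, [])
  else
    (st.1, [])

def associate_comments_py (yaml_str : String) : List (String × String) :=
  let fin := (PySem.Chars.splitlines yaml_str.toList).foldl pvStepA (PySem.Dict.empty, [])
  fin.1.items.map (fun kv => (String.ofList kv.1, String.ofList kv.2))

-- ===== PORT B =====
-- ''.join(reversed(pieces)) where pieces are collected walking backwards over `before` while lines start with '#'
def pvBack (before : List (List Char)) : List Char :=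
  (((before.reverse.takeWhile (fun p => PySem.Chars.startswith p ['#'])).map pvTrans).reverse).flatten

-- B's for-loop: carries the list `before` of already-seen lines
def pvBLoop (before : List (List Char)) (rem : List (List Char))
    (d : PySem.Dict (List Char) (List Char)) : PySem.Dict (List Char) (List Char) :=
  match rem with
  | [] => d
  | line :: rest =>
      pvBLoop (before ++ [line]) rest
        (if !line.isEmpty && !(PySem.Chars.isspace (line.headD ' '))
            && !(PySem.Chars.startswith line ['#'])
         then d.insert (pvKey line) (pvBack before)
         else d)

def associate_comments_py_alt (yaml_str : String) : List (String × String) :=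
  (pvBLoop [] (PySem.Chars.splitlines yaml_str.toList) PySem.Dict.empty).items.map
    (fun kv => (String.ofList kv.1, String.ofList kv.2))

-- ===== PRECONDITION & SPEC =====
def Spec_associate_comments_py (yaml_str : String) (out : List (String × String)) : Prop := out = associate_comments_py_alt yaml_str
instance (yaml_str : String) (out : List (String × String)) : Decidable (Spec_associate_comments_py yaml_str out) := by unfold Spec_associate_comments_py; infer_instance

-- ===== CLAIM (what is proved, stated in full; the proofs are below) =====
def Claim_equal_associate_comments_py : Prop := ∀ (yaml_str : String), Dom_associate_comments_py yaml_str → Spec_associate_comments_py yaml_str (associate_comments_py yaml_str)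

-- ===== LEMMAS AND PROOFS =====

-- appending a '#' line extends the backward-collected comment on the right
theorem pvBack_hash (before : List (List Char)) (line : List Char)
    (h : PySem.Chars.startswith line ['#'] = true) :
    pvBack (before ++ [line]) = pvBack before ++ pvTrans line := by
  simp [pvBack, h]

-- appending a non-'#' line resets the backward-collected comment
theorem pvBack_nonhash (before : List (List Char)) (line : List Char)
    (h : PySem.Chars.startswith line ['#'] = false) :
    pvBack (before ++ [line]) = [] := by
  simp [pvBack, h]

-- main invariant: A's fold from state (d, pvBack before) and B's loop agree
theorem pv_loop_eq : ∀ (rem before : List (List Char)) (d : PySem.Dict (List Char) (List Char)),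
    (rem.foldl pvStepA (d, pvBack before)).1 = pvBLoop before rem d := by
  intro rem
  induction rem with
  | nil => intro before d; simp [pvBLoop]
  | cons line rest ih =>
    intro before d
    rw [List.foldl_cons]
    by_cases h1 : PySem.Chars.startswith line ['#'] = true
    · have := pvBack_hash before line h1
      simp only [pvStepA, if_true, pvBLoop, h1, Bool.and_false, Bool.not_true]
      rw [← this, ih (before ++ [line]) d]
      simp
    · have h1' : PySem.Chars.startswith line ['#'] = false := by
        simpa using h1
      have hreset := pvBack_nonhash before line h1'
      by_cases h2 : (!line.isEmpty && !(PySem.Chars.isspace (line.headD ' '))) = true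
      · simp only [pvStepA, h1', pvBLoop, h2, Bool.not_false, Bool.and_true, if_true,
          Bool.false_eq_true, if_false]
        rw [← hreset, ih (before ++ [line])]
      · have h2' : (!line.isEmpty && !(PySem.Chars.isspace (line.headD ' '))) = false := by
          simpa using h2
        simp only [pvStepA, h1', pvBLoop, h2', Bool.false_and, Bool.false_eq_true, if_false]
        rw [← hreset, ih (before ++ [line])]

-- ===== VERDICT (by name: the statement is the Claim_ definition above) =====
theorem associate_comments_py_spec : Claim_equal_associate_comments_py := by
  intro yaml_str _
  unfold Spec_associate_comments_py associate_comments_py associate_comments_py_alt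
  have h := pv_loop_eq (PySem.Chars.splitlines yaml_str.toList) [] PySem.Dict.empty
  simp only [pvBack, List.reverse_nil, List.takeWhile_nil, List.map_nil, List.flatten_nil] at h
  exact congrArg (fun d => d.items.map (fun kv => (String.ofList kv.1, String.ofList kv.2))) h
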